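-- pv_equiv track=rewrite | github.com/JohnDvorak/general-cryptanalysis | homework-2-cryptanalysis.py | split_substrings
-- ===== SOURCE A (Python) =====
-- def split_substrings(ciphertext, keylength):
--     """ Splits the ciphertext into 'keylength' substrings and offsets
--     them as described in Homework 2 problem 2 """
--
--     substring_list = [''] * keylength
--     substring_index = 0
--     offset = 0
--
--     # split the ciphertext into substrings
--     for letter in ciphertext:
--         # offset the letter by which key iteration it is on
--         new_letter_value = ord(letter) - offset
--
--         # Can't use modulo, so put it back in range 65-90
--         while new_letter_value < 65:
--             new_letter_value += 26
--
--         # add it to the list, continue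
--         substring_list[substring_index] += chr(new_letter_value)
--         substring_index += 1
--         # If we've gone past the keylength, reset to 0 and increase offset
--         if substring_index == keylength:
--             substring_index = 0
--             offset += 1
--
--     return substring_list
-- ===== SOURCE B (Python) =====
-- def split_substrings(ciphertext, keylength):
--     """Column-wise reconstruction: substring j is built directly from the
--     stride slice ciphertext[j::keylength]; the enumeration position of a
--     letter inside its slice equals the offset the round-robin pass would
--     have applied, and the wrap-up-by-26 loop is replaced by one modular
--     adjustment."""
--     result = []
--     for j in range(keylength):
--         chars = []
--         for off, letter in enumerate(ciphertext[j::keylength]):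
--             val = ord(letter) - off
--             if val < 65:
--                 val = 65 + (val - 65) % 26
--             chars.append(chr(val))
--         result.append(''.join(chars))
--     return result
-- ===== Notes on version B (the rewrite author's own statement) =====
-- stated objective: alternative
-- what changed: B builds each substring independently from the stride slice ciphertext[j::keylength] (enumeration position = offset) instead of A's round-robin distribution over a mutable list with a running index/offset, and replaces A's add-26-until-in-range while loop by a single modular adjustment.
import Mathlib
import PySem

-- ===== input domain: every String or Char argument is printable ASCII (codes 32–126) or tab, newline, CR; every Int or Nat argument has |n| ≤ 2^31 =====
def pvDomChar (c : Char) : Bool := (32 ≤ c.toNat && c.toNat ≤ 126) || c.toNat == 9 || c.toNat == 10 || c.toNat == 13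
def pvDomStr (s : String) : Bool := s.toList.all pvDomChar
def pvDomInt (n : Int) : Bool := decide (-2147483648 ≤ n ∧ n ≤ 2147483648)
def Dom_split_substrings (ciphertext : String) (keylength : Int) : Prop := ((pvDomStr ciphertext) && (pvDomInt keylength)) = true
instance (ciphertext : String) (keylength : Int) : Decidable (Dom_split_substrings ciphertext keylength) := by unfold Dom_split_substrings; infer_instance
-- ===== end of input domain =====

-- B re-implements A column-wise (one stride slice per key position, offsets by
-- enumeration, one modular adjustment instead of the add-26 loop); the proof is
-- about the return value only (neither program mutates its arguments).

-- ===== PORT A =====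
-- the 'while new_letter_value < 65: new_letter_value += 26' loop
def pvWrapA (v : Int) : Int :=
  if v < 65 then pvWrapA (v + 26) else v
termination_by (65 - v).toNat
decreasing_by omega

-- one iteration of A's 'for letter in ciphertext' loop; substrings are kept as
-- List Char (Python's str += chr(...)) and turned into String at the end.
-- Out-of-range substring_list[substring_index] is Python's IndexError (excluded
-- by Pre_); List.set/getD are no-ops there.
def pvStepA (keylength : Int) (st : List (List Char) × Nat × Int) (c : Char) :
    List (List Char) × Nat × Int :=
  let v := pvWrapA ((c.toNat : Int) - st.2.2)
  let lst := st.1.set st.2.1 (st.1.getD st.2.1 [] ++ [Char.ofNat v.toNat])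
  if ((st.2.1 + 1 : Nat) : Int) = keylength then (lst, 0, st.2.2 + 1)
  else (lst, st.2.1 + 1, st.2.2)

def split_substrings (ciphertext : String) (keylength : Int) : List String :=
  ((ciphertext.toList.foldl (pvStepA keylength)
      (List.replicate keylength.toNat [], 0, 0)).1).map (fun l => String.mk l)

-- ===== PORT B =====
-- 'val = 65 + (val - 65) % 26' branch of Source B
def pvWrapB (v : Int) : Int :=
  if v < 65 then 65 + PySem.Int.mod (v - 65) 26 else v

-- column j = ciphertext[j::keylength], enumerated; pairs of PySem.List.enumerate
-- are Python's (index, letter).  slice? is none only for step 0, which the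
-- range over keylength never produces, so .getD [] is a pure totality guard.
def split_substrings_alt (ciphertext : String) (keylength : Int) : List String :=
  (PySem.List.pyRange 0 keylength 1).map (fun j =>
    String.mk ((PySem.List.enumerate
        ((PySem.List.slice? ciphertext.toList (some j) none keylength).getD [])).map
      (fun p => Char.ofNat (pvWrapB ((p.2.toNat : Int) - p.1)).toNat)))

-- ===== PRECONDITION & SPEC =====
-- Pre_ excludes exactly the inputs where A raises IndexError: keylength ≤ 0
-- together with a non-empty ciphertext (substring_list has no cell to write to).
def Pre_split_substrings (ciphertext : String) (keylength : Int) : Prop :=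
  0 < keylength ∨ ciphertext = ""
instance (ciphertext : String) (keylength : Int) : Decidable (Pre_split_substrings ciphertext keylength) := by
  unfold Pre_split_substrings; infer_instance

def pvWitness_split_substrings : String × Int := ("HELLO WORLD!", 3)

def Spec_split_substrings (ciphertext : String) (keylength : Int) (out : List String) : Prop :=
  out = split_substrings_alt ciphertext keylength
instance (ciphertext : String) (keylength : Int) (out : List String) : Decidable (Spec_split_substrings ciphertext keylength out) := by
  unfold Spec_split_substrings; infer_instance

-- ===== CLAIM (what is proved, stated in full; the proofs are below) =====
def Claim_equal_split_substrings : Prop := ∀ (ciphertext : String) (keylength : Int), Dom_split_substrings ciphertext keylength → Pre_split_substrings ciphertext keylength → Spec_split_substrings ciphertext keylength (split_substrings ciphertext keylength)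


-- ===== LEMMAS AND PROOFS =====

-- A's transformation of one letter, as a function of its offset
def pvG (off : Int) (c : Char) : Char := Char.ofNat (pvWrapA ((c.toNat : Int) - off)).toNat

-- what A appends to column j while folding from state (·, i, off)
def pvColFrom (k : Nat) : List Char → Nat → Int → Nat → List Char
  | [], _, _, _ => []
  | c :: cs, i, off, j =>
    let tail := if i + 1 = k then pvColFrom k cs 0 (off + 1) j
                else pvColFrom k cs (i + 1) off j
    if i = j then pvG off c :: tail else tail

-- every k-th element, starting with the head
def pvEveryK (k : Nat) : List Char → List Char
  | [] => []
  | c :: cs => c :: pvEveryK k (cs.drop (k - 1))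
termination_by l => l.length
decreasing_by simp [List.length_drop]

-- map with offsets off, off+1, off+2, …
def pvMapOff (off : Int) : List Char → List Char
  | [] => []
  | c :: cs => pvG off c :: pvMapOff (off + 1) cs

@[simp] theorem pvEveryK_nil (k : Nat) : pvEveryK k [] = [] := by rw [pvEveryK.eq_def]
@[simp] theorem pvEveryK_cons (k : Nat) (c : Char) (cs : List Char) :
    pvEveryK k (c :: cs) = c :: pvEveryK k (cs.drop (k - 1)) := by rw [pvEveryK.eq_def]
@[simp] theorem pvMapOff_nil (off : Int) : pvMapOff off [] = [] := by rw [pvMapOff]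
@[simp] theorem pvMapOff_cons (off : Int) (c : Char) (cs : List Char) :
    pvMapOff off (c :: cs) = pvG off c :: pvMapOff (off + 1) cs := by rw [pvMapOff]

theorem pvWrapAux_eq (n : Nat) : ∀ v : Int, (65 - v).toNat ≤ n → pvWrapA v = pvWrapB v := by
  induction n with
  | zero =>
    intro v hv
    have h : ¬ v < 65 := by omega
    rw [pvWrapA, pvWrapB, if_neg h, if_neg h]
  | succ n ih =>
    intro v hv
    by_cases h : v < 65
    · rw [pvWrapA, if_pos h, ih (v + 26) (by omega)]
      unfold pvWrapB
      have h26 := PySem.Int.mod_eq_emod_of_pos (a := v - 65) (b := 26) (by norm_num)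
      have h26' := PySem.Int.mod_eq_emod_of_pos (a := v + 26 - 65) (b := 26) (by norm_num)
      rw [if_pos h]
      split_ifs with h1
      · rw [h26, h26']; omega
      · rw [h26]; omega
    · rw [pvWrapA, pvWrapB, if_neg h, if_neg h]

theorem pvWrap_eq (v : Int) : pvWrapA v = pvWrapB v :=
  pvWrapAux_eq (65 - v).toNat v le_rfl

theorem pvFoldA_char (k : Nat) (hk : 0 < k) :
    ∀ (cs : List Char) (lst : List (List Char)) (i : Nat) (off : Int),
      i < k → lst.length = k →
      (cs.foldl (pvStepA (k : Int)) (lst, i, off)).1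
        = (List.range k).map (fun j => lst.getD j [] ++ pvColFrom k cs i off j) := by
  intro cs
  induction cs with
  | nil =>
    intro lst i off hi hlen
    simp only [List.foldl_nil, pvColFrom, List.append_nil]
    apply List.ext_getElem
    · simp [hlen]
    · intro m hm hm'
      have hml : m < lst.length := hm
      simp only [List.getElem_map, List.getElem_range]
      exact (List.getD_eq_getElem lst [] hml).symm
  | cons c cs ih =>
    intro lst i off hi hlen
    have hstep : pvStepA (k : Int) (lst, i, off) c =
        (lst.set i (lst.getD i [] ++ [pvG off c]),
         if i + 1 = k then 0 else i + 1,
         if i + 1 = k then off + 1 else off) := by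
      simp only [pvStepA, pvG]
      by_cases hik : i + 1 = k
      · rw [if_pos (by exact_mod_cast hik), if_pos hik, if_pos hik]
      · rw [if_neg (by exact_mod_cast hik), if_neg hik, if_neg hik]
    have hset : ∀ j, j < k →
        (lst.set i (lst.getD i [] ++ [pvG off c])).getD j [] =
          if i = j then lst.getD j [] ++ [pvG off c] else lst.getD j [] := by
      intro j hj
      have hjl : j < lst.length := by omega
      have hjl' : j < (lst.set i (lst.getD i [] ++ [pvG off c])).length := by
        simpa using hjl
      rw [List.getD_eq_getElem _ _ hjl', List.getElem_set]
      split_ifs with hij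
      · subst hij; rw [List.getD_eq_getElem _ _ hjl]
      · rw [List.getD_eq_getElem _ _ hjl]
    simp only [List.foldl_cons, hstep]
    by_cases hik : i + 1 = k
    · simp only [hik, reduceIte]
      rw [ih _ 0 (off + 1) hk (by simpa using hlen)]
      apply List.map_congr_left
      intro j hj
      have hjk : j < k := List.mem_range.mp hj
      rw [hset j hjk]
      simp only [pvColFrom, if_pos hik]
      split_ifs with hij <;> simp
    · simp only [if_neg hik]
      rw [ih _ (i + 1) off (by omega) (by simpa using hlen)]
      apply List.map_congr_left
      intro j hj
      have hjk : j < k := List.mem_range.mp hj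
      rw [hset j hjk]
      simp only [pvColFrom, if_neg hik]
      split_ifs with hij <;> simp

theorem pvColFrom_eq (k : Nat) (hk : 0 < k) :
    ∀ (cs : List Char) (i : Nat) (off : Int) (j : Nat), i < k → j < k →
      pvColFrom k cs i off j =
        if i ≤ j then pvMapOff off (pvEveryK k (cs.drop (j - i)))
        else pvMapOff (off + 1) (pvEveryK k (cs.drop (k - i + j))) := by
  intro cs
  induction cs with
  | nil =>
    intro i off j hi hj
    simp only [pvColFrom, List.drop_nil, pvEveryK_nil, pvMapOff_nil]
    split_ifs <;> rfl
  | cons c cs ih =>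
    intro i off j hi hj
    simp only [pvColFrom]
    by_cases hij : i = j
    · subst hij
      rw [if_pos rfl, if_pos le_rfl]
      simp only [Nat.sub_self, List.drop_zero, pvEveryK_cons, pvMapOff_cons]
      congr 1
      by_cases hik : i + 1 = k
      · rw [if_pos hik, ih 0 (off + 1) i hk hi, if_pos (Nat.zero_le _),
          Nat.sub_zero]
        have h : i = k - 1 := by omega
        rw [h]
      · rw [if_neg hik, ih (i + 1) off i (by omega) hi, if_neg (by omega)]
        have h : k - (i + 1) + i = k - 1 := by omega
        rw [h]
    · rw [if_neg hij]
      by_cases hle : i ≤ j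
      · have hlt : i < j := lt_of_le_of_ne hle hij
        rw [if_pos hle]
        have hik : i + 1 ≠ k := by omega
        rw [if_neg hik, ih (i + 1) off j (by omega) hj, if_pos (by omega)]
        have h : j - i = (j - (i + 1)) + 1 := by omega
        rw [h, List.drop_succ_cons]
      · rw [if_neg hle]
        by_cases hik : i + 1 = k
        · rw [if_pos hik, ih 0 (off + 1) j hk hj, if_pos (Nat.zero_le _),
            Nat.sub_zero]
          have h : k - i + j = j + 1 := by omega
          rw [h, List.drop_succ_cons]
        · rw [if_neg hik, ih (i + 1) off j (by omega) hj, if_neg (by omega)]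
          have h : k - i + j = (k - (i + 1) + j) + 1 := by omega
          rw [h, List.drop_succ_cons]

theorem pvFilterMap_strideAux (k : Nat) (hk : 0 < k) :
    ∀ (n : Nat) (l : List Char), l.length ≤ n →
      (List.range ((l.length + k - 1) / k)).filterMap (fun m => l[k * m]?)
        = pvEveryK k l := by
  intro n
  induction n with
  | zero =>
    intro l hl
    have h0 : l = [] := List.eq_nil_of_length_eq_zero (by omega)
    subst h0
    simp
  | succ n ih =>
    intro l hl
    match l with
    | [] => simp
    | c :: cs =>
      have hcount : ((c :: cs).length + k - 1) / k = cs.length / k + 1 := by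
        have h1 : (c :: cs).length + k - 1 = cs.length + k := by
          simp only [List.length_cons]; omega
        rw [h1, Nat.add_div_right _ hk]
      have hcount2 : ((cs.drop (k - 1)).length + k - 1) / k = cs.length / k := by
        rw [List.length_drop]
        by_cases h : k - 1 ≤ cs.length
        · have h2 : cs.length - (k - 1) + k - 1 = cs.length := by omega
          rw [h2]
        · have h0 : cs.length - (k - 1) = 0 := by omega
          rw [h0, Nat.div_eq_of_lt (by omega), Nat.div_eq_of_lt (by omega)]
      have hdlen : (cs.drop (k - 1)).length ≤ n := by
        rw [List.length_drop]
        have : cs.length ≤ n := by simpa using Nat.lt_succ_iff.mp (by simpa using hl)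
        omega
      rw [hcount, List.range_succ_eq_map, List.filterMap_cons, List.filterMap_map]
      have hhead : (c :: cs)[k * 0]? = some c := by simp
      rw [hhead]
      have hfun : ∀ m : Nat, ((fun m => (c :: cs)[k * m]?) ∘ Nat.succ) m
          = (cs.drop (k - 1))[k * m]? := by
        intro m
        have h1 : k * Nat.succ m = ((k - 1) + k * m) + 1 := by
          have := Nat.mul_succ k m; omega
        simp only [Function.comp_apply, h1, List.getElem?_cons_succ,
          List.getElem?_drop]
      rw [List.filterMap_congr (fun m _ => hfun m), ← hcount2,
        ih (cs.drop (k - 1)) hdlen, pvEveryK_cons]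

theorem pvFilterMap_stride (k : Nat) (hk : 0 < k) :
    ∀ (l : List Char),
      (List.range ((l.length + k - 1) / k)).filterMap (fun m => l[k * m]?)
        = pvEveryK k l :=
  fun l => pvFilterMap_strideAux k hk l.length l le_rfl

theorem pvSlice_stride (k : Nat) (hk : 0 < k) (xs : List Char) (j : Nat) :
    PySem.List.slice? xs (some (j : Int)) none (k : Int)
      = some (pvEveryK k (xs.drop j)) := by
  have h1 : ¬ ((k : Int) = 0) := by omega
  have h2 : ¬ ((k : Int) < 0) := by omega
  have h3 : ¬ ((j : Int) < 0) := by omega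
  have h4 : (0 : Int) < (k : Int) := by omega
  simp only [PySem.List.slice?, PySem.List.sliceIndices, if_neg h1, if_neg h2,
    if_neg h3, if_pos h4]
  congr 1
  have hmin : min (j : Int) (xs.length : Int) = ((min j xs.length : Nat) : Int) := by
    simp [Nat.cast_min]
  rw [hmin]
  set s0 : Nat := min j xs.length with hs0
  have hs0le : s0 ≤ xs.length := by omega
  have hidx : ∀ m : Nat, xs[((s0 : Int) + (k : Int) * (m : Int)).toNat]?
      = (xs.drop s0)[k * m]? := by
    intro m
    have h : ((s0 : Int) + (k : Int) * (m : Int)).toNat = s0 + k * m := by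
      have hc : (s0 : Int) + (k : Int) * (m : Int) = ((s0 + k * m : Nat) : Int) := by
        push_cast; ring
      rw [hc, Int.toNat_natCast]
    rw [h, ← List.getElem?_drop]
  have hcount : (if (s0 : Int) < (xs.length : Int)
        then (((xs.length : Int) - (s0 : Int) + (k : Int) - 1) / (k : Int)).toNat else 0)
      = ((xs.drop s0).length + k - 1) / k := by
    rw [List.length_drop]
    by_cases h : s0 < xs.length
    · rw [if_pos (by exact_mod_cast h)]
      have hc : (xs.length : Int) - (s0 : Int) + (k : Int) - 1
          = ((xs.length - s0 + k - 1 : Nat) : Int) := by omega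
      rw [hc, ← Int.natCast_div, Int.toNat_natCast]
    · rw [if_neg (by exact_mod_cast h)]
      have h0 : xs.length - s0 = 0 := by omega
      rw [h0, Nat.div_eq_of_lt (by omega)]
  rw [hcount, List.filterMap_congr (fun m _ => hidx m),
    pvFilterMap_stride k hk (xs.drop s0)]
  by_cases h : j ≤ xs.length
  · have hsj : s0 = j := by omega
    rw [hsj]
  · have hd1 : xs.drop s0 = [] := List.drop_eq_nil_of_le (by omega)
    have hd2 : xs.drop j = [] := List.drop_eq_nil_of_le (by omega)
    rw [hd1, hd2]

theorem pvEnumerate_mapOff (xs : List Char) (n : Nat) :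
    (PySem.List.enumerate xs (n : Int)).map
        (fun p => Char.ofNat (pvWrapB ((p.2.toNat : Int) - p.1)).toNat)
      = pvMapOff (n : Int) xs := by
  induction xs generalizing n with
  | nil => simp [PySem.List.enumerate, pvMapOff]
  | cons c cs ih =>
    rw [PySem.List.enumerate_cons, List.map_cons, pvMapOff]
    have h : ((n : Int)) + 1 = ((n + 1 : Nat) : Int) := by push_cast; ring
    rw [h, ih (n + 1)]
    simp [pvG, pvWrap_eq]

-- ===== VERDICT (by name: the statement is the Claim_ definition above) =====
theorem split_substrings_spec : Claim_equal_split_substrings := by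
  intro ct k _ hpre
  unfold Spec_split_substrings
  by_cases hk : 0 < k
  · obtain ⟨K, rfl⟩ : ∃ K : Nat, k = (K : Int) :=
      ⟨k.toNat, (Int.toNat_of_nonneg hk.le).symm⟩
    have hK : 0 < K := by exact_mod_cast hk
    unfold split_substrings split_substrings_alt
    rw [Int.toNat_natCast,
      pvFoldA_char K hK ct.toList (List.replicate K []) 0 0 hK (by simp),
      PySem.List.pyRange_zero_natCast, List.map_map, List.map_map]
    apply List.map_congr_left
    intro j hj
    have hjK : j < K := List.mem_range.mp hj
    simp only [Function.comp_apply]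
    rw [List.getD_replicate _ hjK, List.nil_append,
      pvColFrom_eq K hK ct.toList 0 0 j hK hjK, if_pos (Nat.zero_le _),
      pvSlice_stride K hK ct.toList j]
    simp only [Option.getD_some, Nat.sub_zero]
    have := pvEnumerate_mapOff (pvEveryK K (ct.toList.drop j)) 0
    simp only [Nat.cast_zero] at this
    rw [this]
  · have hct : ct = "" := hpre.resolve_left hk
    subst hct
    have hk0 : k.toNat = 0 := by omega
    unfold split_substrings split_substrings_alt
    rw [PySem.List.pyRange_of_pos 0 k (by norm_num : (0:Int) < 1)]
    have h2 : ¬ (0 : Int) < k := hk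
    simp [hk0, h2]
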